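-- pv_equiv track=rewrite | github.com/StateraSolutions/avenlis-sandstrike | sandstrike/redteam/encoders.py | encode_leet_speak
-- ===== SOURCE A (Python) =====
-- def encode_leet_speak(text: str) -> str:
--     """Convert text to leet speak."""
--     leet_map = {
--         'a': '4', 'e': '3', 'i': '1', 'o': '0', 's': '5', 't': '7',
--         'A': '4', 'E': '3', 'I': '1', 'O': '0', 'S': '5', 'T': '7'
--     }
--     try:
--         for char, replacement in leet_map.items():
--             text = text.replace(char, replacement)
--         return text
--     except Exception:
--         return text
-- ===== SOURCE B (Python) =====
-- def _leet(c: str) -> str: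
--     if c == 'a' or c == 'A':
--         return '4'
--     if c == 'e' or c == 'E':
--         return '3'
--     if c == 'i' or c == 'I':
--         return '1'
--     if c == 'o' or c == 'O':
--         return '0'
--     if c == 's' or c == 'S':
--         return '5'
--     if c == 't' or c == 'T':
--         return '7'
--     return c
--
--
-- def encode_leet_speak(text: str) -> str:
--     """Convert text to leet speak."""
--     pieces = []
--     for c in text:
--         pieces.append(_leet(c))
--     return ''.join(pieces)
-- ===== Notes on version B (the rewrite author's own statement) =====
-- stated objective: alternative
-- what changed: A rewrites the whole string 12 times via successive str.replace passes driven by a dict (plus a dead try/except); B drops the dict entirely and makes a single character-by-character pass, classifying each character with an explicit if/or chain and appending the digit (or the character) to an accumulator that is joined once.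
import Mathlib
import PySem

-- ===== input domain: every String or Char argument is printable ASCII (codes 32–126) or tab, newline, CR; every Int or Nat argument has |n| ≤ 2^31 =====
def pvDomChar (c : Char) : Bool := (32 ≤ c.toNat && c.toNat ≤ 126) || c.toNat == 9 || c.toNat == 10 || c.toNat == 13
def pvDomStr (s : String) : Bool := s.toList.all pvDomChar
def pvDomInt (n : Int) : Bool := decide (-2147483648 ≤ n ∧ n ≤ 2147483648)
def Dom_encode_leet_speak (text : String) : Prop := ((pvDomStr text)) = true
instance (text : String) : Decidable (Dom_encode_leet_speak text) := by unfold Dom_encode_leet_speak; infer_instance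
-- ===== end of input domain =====

-- B replaces A's 12 sequential dict-driven whole-string replace passes by one
-- character-by-character pass with an if/or chain and an explicit accumulator
-- (objective: alternative single pass, no dict); return values proved equal.

-- ===== PORT A =====
-- leet_map literal (Python dict, insertion order, no duplicate keys)
def pvLeetMapA : PySem.Dict String String :=
  PySem.Dict.mk [("a","4"),("e","3"),("i","1"),("o","0"),("s","5"),("t","7"),
                 ("A","4"),("E","3"),("I","1"),("O","0"),("S","5"),("T","7")]

-- the try/except in A cannot fire for a str input; it is the loop over leet_map.items()
def encode_leet_speak (text : String) : String :=
  (PySem.Dict.items pvLeetMapA).foldl (fun t p => PySem.Str.replace t p.1 p.2) text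

-- ===== PORT B =====
-- _leet(c): iterating a Python str yields 1-char strings, so the comparisons are Char equalities
def pvLeet (c : Char) : String :=
  if c = 'a' ∨ c = 'A' then "4"
  else if c = 'e' ∨ c = 'E' then "3"
  else if c = 'i' ∨ c = 'I' then "1"
  else if c = 'o' ∨ c = 'O' then "0"
  else if c = 's' ∨ c = 'S' then "5"
  else if c = 't' ∨ c = 'T' then "7"
  else String.singleton c

-- the for-loop appending _leet(c) to pieces, then ''.join(pieces)
def encode_leet_speak_alt (text : String) : String :=
  PySem.Str.join "" (text.toList.foldl (fun pieces c => pieces ++ [pvLeet c]) [])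

-- ===== PRECONDITION & SPEC =====
def Spec_encode_leet_speak (text : String) (out : String) : Prop := out = encode_leet_speak_alt text
instance (text : String) (out : String) : Decidable (Spec_encode_leet_speak text out) := by unfold Spec_encode_leet_speak; infer_instance

-- ===== CLAIM (what is proved, stated in full; the proofs are below) =====
def Claim_equal_encode_leet_speak : Prop := ∀ (text : String), Dom_encode_leet_speak text → Spec_encode_leet_speak text (encode_leet_speak text)

-- ===== LEMMAS AND PROOFS =====

-- the character substitution both sides compute (proof helper only)
def pvSubst (c : Char) : Char :=
  if c = 'a' then '4' else if c = 'e' then '3' else if c = 'i' then '1' else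
  if c = 'o' then '0' else if c = 's' then '5' else if c = 't' then '7' else
  if c = 'A' then '4' else if c = 'E' then '3' else if c = 'I' then '1' else
  if c = 'O' then '0' else if c = 'S' then '5' else if c = 'T' then '7' else c

theorem pv_go_single (a b : Char) : ∀ (l acc : List Char) (fuel : Nat), l.length ≤ fuel →
    PySem.Chars.replace.go [a] [b] fuel l acc
      = acc.reverse ++ l.map (fun c => if c = a then b else c) := by
  intro l
  induction l with
  | nil =>
    intro acc fuel _
    cases fuel <;> simp [PySem.Chars.replace.go]
  | cons c t ih =>
    intro acc fuel h
    cases fuel with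
    | zero => simp at h
    | succ f =>
      have hf : t.length ≤ f := by simp only [List.length_cons] at h; omega
      rw [show PySem.Chars.replace.go [a] [b] (f + 1) (c :: t) acc
            = if [a].isPrefixOf (c :: t)
              then PySem.Chars.replace.go [a] [b] f (List.drop 1 (c :: t)) ([b].reverse ++ acc)
              else PySem.Chars.replace.go [a] [b] f t (c :: acc) from rfl]
      by_cases hc : a = c
      · subst hc
        rw [if_pos (by simp [List.isPrefixOf])]
        simp only [List.drop_succ_cons, List.drop_zero, List.reverse_singleton, List.singleton_append]
        rw [ih (b :: acc) f hf]
        simp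
      · rw [if_neg (by simp [List.isPrefixOf, hc])]
        rw [ih (c :: acc) f hf]
        have hca : ¬ c = a := fun h' => hc h'.symm
        simp [hca]

theorem pv_replace_single (s : String) (a b : Char) :
    PySem.Str.replace s (String.singleton a) (String.singleton b)
      = String.ofList (s.toList.map (fun c => if c = a then b else c)) := by
  unfold PySem.Str.replace PySem.Chars.replace
  simp only [show (String.singleton a).toList = [a] by simp,
    show (String.singleton b).toList = [b] by simp, List.isEmpty_cons, if_neg Bool.false_ne_true]
  rw [pv_go_single a b s.toList [] s.toList.length le_rfl]
  simp

theorem pv_leet_eq (c : Char) : pvLeet c = String.singleton (pvSubst c) := by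
  unfold pvLeet pvSubst
  by_cases h1 : c = 'a'; · subst h1; decide
  by_cases h2 : c = 'e'; · subst h2; decide
  by_cases h3 : c = 'i'; · subst h3; decide
  by_cases h4 : c = 'o'; · subst h4; decide
  by_cases h5 : c = 's'; · subst h5; decide
  by_cases h6 : c = 't'; · subst h6; decide
  by_cases h7 : c = 'A'; · subst h7; decide
  by_cases h8 : c = 'E'; · subst h8; decide
  by_cases h9 : c = 'I'; · subst h9; decide
  by_cases h10 : c = 'O'; · subst h10; decide
  by_cases h11 : c = 'S'; · subst h11; decide
  by_cases h12 : c = 'T'; · subst h12; decide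
  simp [h1, h2, h3, h4, h5, h6, h7, h8, h9, h10, h11, h12]

theorem pv_foldl_append {α β : Type} (f : α → β) :
    ∀ (l : List α) (acc : List β), l.foldl (fun pieces c => pieces ++ [f c]) acc = acc ++ l.map f := by
  intro l
  induction l with
  | nil => intro acc; simp
  | cons c t ih => intro acc; simp [List.foldl, ih]

theorem pv_B_eq (text : String) :
    encode_leet_speak_alt text = String.ofList (text.toList.map pvSubst) := by
  unfold encode_leet_speak_alt
  rw [pv_foldl_append, List.nil_append,
      List.map_congr_left (fun c _ => pv_leet_eq c)]
  unfold PySem.Str.join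
  simp only [show ("" : String).toList = [] from rfl, List.map_map]
  have h1 : (String.toList ∘ fun c => String.singleton (pvSubst c)) = (fun c => [c]) ∘ pvSubst := by
    funext c; simp
  rw [h1, ← List.map_map, PySem.Chars.join_nil_singletons]

theorem pv_subst_comp (c : Char) :
    (fun x => if x = 'T' then '7' else x)
    ((fun x => if x = 'S' then '5' else x)
    ((fun x => if x = 'O' then '0' else x)
    ((fun x => if x = 'I' then '1' else x)
    ((fun x => if x = 'E' then '3' else x)
    ((fun x => if x = 'A' then '4' else x)
    ((fun x => if x = 't' then '7' else x)
    ((fun x => if x = 's' then '5' else x)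
    ((fun x => if x = 'o' then '0' else x)
    ((fun x => if x = 'i' then '1' else x)
    ((fun x => if x = 'e' then '3' else x)
    ((fun x => if x = 'a' then '4' else x) c))))))))))) = pvSubst c := by
  unfold pvSubst
  by_cases h1 : c = 'a'; · subst h1; decide
  by_cases h2 : c = 'e'; · subst h2; decide
  by_cases h3 : c = 'i'; · subst h3; decide
  by_cases h4 : c = 'o'; · subst h4; decide
  by_cases h5 : c = 's'; · subst h5; decide
  by_cases h6 : c = 't'; · subst h6; decide
  by_cases h7 : c = 'A'; · subst h7; decide
  by_cases h8 : c = 'E'; · subst h8; decide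
  by_cases h9 : c = 'I'; · subst h9; decide
  by_cases h10 : c = 'O'; · subst h10; decide
  by_cases h11 : c = 'S'; · subst h11; decide
  by_cases h12 : c = 'T'; · subst h12; decide
  simp [h1, h2, h3, h4, h5, h6, h7, h8, h9, h10, h11, h12]

theorem pv_A_eq (text : String) :
    encode_leet_speak text = String.ofList (text.toList.map pvSubst) := by
  unfold encode_leet_speak pvLeetMapA
  simp only [List.foldl]
  have hs : ∀ (d r : Char) (s : String), PySem.Str.replace s (String.singleton d) (String.singleton r)
      = String.ofList (s.toList.map (fun c => if c = d then r else c)) := fun d r s => pv_replace_single s d r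
  simp only [show ("a" : String) = String.singleton 'a' from rfl,
    show ("4" : String) = String.singleton '4' from rfl,
    show ("e" : String) = String.singleton 'e' from rfl,
    show ("3" : String) = String.singleton '3' from rfl,
    show ("i" : String) = String.singleton 'i' from rfl,
    show ("1" : String) = String.singleton '1' from rfl,
    show ("o" : String) = String.singleton 'o' from rfl,
    show ("0" : String) = String.singleton '0' from rfl,
    show ("s" : String) = String.singleton 's' from rfl,
    show ("5" : String) = String.singleton '5' from rfl,
    show ("t" : String) = String.singleton 't' from rfl,
    show ("7" : String) = String.singleton '7' from rfl,
    show ("A" : String) = String.singleton 'A' from rfl,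
    show ("E" : String) = String.singleton 'E' from rfl,
    show ("I" : String) = String.singleton 'I' from rfl,
    show ("O" : String) = String.singleton 'O' from rfl,
    show ("S" : String) = String.singleton 'S' from rfl,
    show ("T" : String) = String.singleton 'T' from rfl,
    hs]
  simp [List.map_map, Function.comp_def, pv_subst_comp]

-- ===== VERDICT (by name: the statement is the Claim_ definition above) =====
theorem encode_leet_speak_spec : Claim_equal_encode_leet_speak := by
  intro text _
  unfold Spec_encode_leet_speak
  rw [pv_A_eq, pv_B_eq]
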